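-- pv_equiv track=rewrite | github.com/RQM-Technologies-dev/Hydrogen | simulator/hydrogen_shell_simulator.py | angular_states
-- ===== SOURCE A (Python) =====
-- def angular_states(n: int) -> list[dict]:
--     if n < 1:
--         raise ValueError("n must be >= 1")
--     K = n - 1
--     states = []
--     for ell in range(0, n):
--         for m in range(-ell, ell + 1):
--             states.append({"n": n, "K": K, "ell": ell, "m": m})
--     return states
-- ===== SOURCE B (Python) =====
-- def _isqrt(k: int) -> int:
--     if k < 2:
--         return k
--     x = k
--     y = (x + 1) // 2
--     while y < x:
--         x = y
--         y = (x + k // x) // 2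
--     return x
--
-- def angular_states(n: int) -> list[dict]:
--     if n < 1:
--         raise ValueError("n must be >= 1")
--     K = n - 1
--     states = []
--     for i in range(n * n):
--         ell = _isqrt(i)
--         states.append({"n": n, "K": K, "ell": ell, "m": i - ell * ell - ell})
--     return states
-- ===== Notes on version B (the rewrite author's own statement) =====
-- stated objective: alternative
-- what changed: Replaces the nested (ell, m) loops with a single flat loop over the global index i in range(n*n), recovering ell = isqrt(i) via a hand-written integer Newton iteration and m = i - ell*ell - ell in closed form.
import Mathlib
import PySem

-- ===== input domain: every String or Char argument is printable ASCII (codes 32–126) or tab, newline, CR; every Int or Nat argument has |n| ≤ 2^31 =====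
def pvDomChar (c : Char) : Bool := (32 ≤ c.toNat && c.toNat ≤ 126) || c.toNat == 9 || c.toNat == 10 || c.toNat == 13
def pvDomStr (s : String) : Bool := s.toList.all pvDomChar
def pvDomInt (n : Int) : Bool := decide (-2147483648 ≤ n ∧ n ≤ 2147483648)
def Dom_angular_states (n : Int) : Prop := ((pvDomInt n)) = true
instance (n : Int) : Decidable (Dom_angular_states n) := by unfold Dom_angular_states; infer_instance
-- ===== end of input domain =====

-- B enumerates the states by one flat loop over the global index i in range(n*n), recovering
-- ell = isqrt(i) (hand-written integer Newton iteration) and m = i - ell*ell - ell in closed form.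

-- ===== PORT A =====
def angular_states (n : Int) : List (List (String × Int)) :=
  if n < 1 then []   -- Python raises ValueError here; excluded by Pre_
  else
    (PySem.List.pyRange 0 n 1).foldl (fun states ell =>
      (PySem.List.pyRange (-ell) (ell + 1) 1).foldl (fun states m =>
        states ++ [[("n", n), ("K", n - 1), ("ell", ell), ("m", m)]]) states) []

-- ===== PORT B =====
-- the 'while y < x' loop of Source B's _isqrt; the fuel only makes the loop total in Lean:
-- x decreases strictly every iteration, so k.toNat + 1 steps always suffice (pyIsqrtGo_eq below)
def pyIsqrtGo (k : Int) : Nat → Int → Int → Int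
  | 0, x, _ => x
  | f + 1, x, y =>
    if y < x then pyIsqrtGo k f y (PySem.Int.floordiv (y + PySem.Int.floordiv k y) 2)
    else x

-- Source B's _isqrt(k): Newton's method on integers
def pyIsqrt (k : Int) : Int :=
  if k < 2 then k
  else pyIsqrtGo k (k.toNat + 1) k (PySem.Int.floordiv (k + 1) 2)

def angular_states_alt (n : Int) : List (List (String × Int)) :=
  if n < 1 then []   -- Python raises ValueError here; excluded by Pre_
  else
    (PySem.List.pyRange 0 (n * n) 1).foldl (fun states i =>
      let ell := pyIsqrt i
      states ++ [[("n", n), ("K", n - 1), ("ell", ell), ("m", i - ell * ell - ell)]]) []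

-- ===== PRECONDITION & SPEC =====
-- Python A raises ValueError for non-positive n
def Pre_angular_states (n : Int) : Prop := 1 ≤ n
instance (n : Int) : Decidable (Pre_angular_states n) := by unfold Pre_angular_states; infer_instance
def pvWitness_angular_states : Int := 3

def Spec_angular_states (n : Int) (out : List (List (String × Int))) : Prop := out = angular_states_alt n
instance (n : Int) (out : List (List (String × Int))) : Decidable (Spec_angular_states n out) := by unfold Spec_angular_states; infer_instance

-- ===== CLAIM (what is proved, stated in full; the proofs are below) =====
def Claim_equal_angular_states : Prop := ∀ (n : Int), Dom_angular_states n → Pre_angular_states n → Spec_angular_states n (angular_states n)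

-- ===== LEMMAS AND PROOFS =====

-- the row appended for quantum numbers (ell, m) in shell n
def pvState (n ell m : Int) : List (String × Int) :=
  [("n", n), ("K", n - 1), ("ell", ell), ("m", m)]

-- the states of the first k shells, in order
def pvShells (n : Int) (k : Nat) : List (List (String × Int)) :=
  (PySem.List.pyRange 0 (k : Int) 1).foldl
    (fun st ell => st ++ (PySem.List.pyRange (-ell) (ell + 1) 1).map (pvState n ell)) []

theorem pv_foldl_app {α β : Type} (g : α → β) :
    ∀ (l : List α) (acc : List β),
      l.foldl (fun st x => st ++ [g x]) acc = acc ++ l.map g := by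
  intro l
  induction l with
  | nil => simp
  | cons x xs ih => intro acc; simp [List.foldl_cons, ih]

theorem pv_A_eq_shells (n : Int) (hn : 1 ≤ n) :
    angular_states n = pvShells n n.toNat := by
  unfold angular_states pvShells
  rw [if_neg (by omega)]
  have hcast : ((n.toNat : Int)) = n := Int.toNat_of_nonneg (by omega)
  rw [hcast]
  have hfun : (fun (states : List (List (String × Int))) (ell : Int) =>
      (PySem.List.pyRange (-ell) (ell + 1) 1).foldl (fun states m =>
        states ++ [[("n", n), ("K", n - 1), ("ell", ell), ("m", m)]]) states)
      = (fun st ell => st ++ (PySem.List.pyRange (-ell) (ell + 1) 1).map (pvState n ell)) := by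
    funext st ell
    exact pv_foldl_app (pvState n ell) _ st
  rw [hfun]

theorem pv_shells_succ (n : Int) (k : Nat) :
    pvShells n (k + 1) = pvShells n k ++
      (PySem.List.pyRange (-(k : Int)) ((k : Int) + 1) 1).map (pvState n (k : Int)) := by
  unfold pvShells
  have h : ((k + 1 : Nat) : Int) = (k : Int) + 1 := by push_cast; ring
  rw [h, PySem.List.pyRange_one_succ_right (by positivity)]
  simp [List.foldl_append]

-- one Newton step from x ≥ 1 never falls below s = isqrt k (AM–GM on integers)
theorem pv_step_ge (k s x : Int) (hk : s * s ≤ k) (hx : 1 ≤ x) :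
    s ≤ PySem.Int.floordiv (x + PySem.Int.floordiv k x) 2 := by
  have h1 : 2 * s - x ≤ PySem.Int.floordiv k x := by
    rw [PySem.Int.le_floordiv_iff_mul_le (by omega)]
    nlinarith [sq_nonneg (x - s)]
  rw [PySem.Int.le_floordiv_iff_mul_le (by omega)]
  omega

-- once x exceeds s, the Newton step strictly decreases x
theorem pv_step_lt (k s x : Int) (hk : k < (s + 1) * (s + 1)) (hs : 0 ≤ s) (hx : s + 1 ≤ x) :
    PySem.Int.floordiv (x + PySem.Int.floordiv k x) 2 < x := by
  have h1 : PySem.Int.floordiv k x < x := by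
    rw [PySem.Int.floordiv_lt_iff_lt_mul (by omega)]
    nlinarith
  rw [PySem.Int.floordiv_lt_iff_lt_mul (by omega)]
  omega

theorem pv_go_eq (k s : Int) (hk : s * s ≤ k) (hk2 : k < (s + 1) * (s + 1)) (hs : 1 ≤ s) :
    ∀ (f : Nat) (x : Int), s ≤ x → x.toNat < f + s.toNat →
      pyIsqrtGo k f x (PySem.Int.floordiv (x + PySem.Int.floordiv k x) 2) = s := by
  intro f
  induction f with
  | zero =>
    intro x hx hf
    exfalso
    have h1 : s.toNat ≤ x.toNat := by
      have : (0:Int) ≤ s := by omega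
      omega
    omega
  | succ f ih =>
    intro x hx hf
    have hy : s ≤ PySem.Int.floordiv (x + PySem.Int.floordiv k x) 2 :=
      pv_step_ge k s x hk (by omega)
    by_cases hxy : PySem.Int.floordiv (x + PySem.Int.floordiv k x) 2 < x
    · rw [pyIsqrtGo, if_pos hxy]
      exact ih _ hy (by omega)
    · rw [pyIsqrtGo, if_neg hxy]
      by_contra hne
      have hx1 : s + 1 ≤ x := by omega
      exact hxy (pv_step_lt k s x hk2 (by omega) hx1)

-- Source B's _isqrt computes the integer square root
theorem pv_isqrt_eq (k : Int) (hk : 0 ≤ k) : pyIsqrt k = (Nat.sqrt k.toNat : Int) := by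
  by_cases h2 : k < 2
  · have : k = 0 ∨ k = 1 := by omega
    rcases this with h | h <;> subst h <;> simp [pyIsqrt]
  · have hk2 : 2 ≤ k := by omega
    set s : Int := (Nat.sqrt k.toNat : Int) with hsdef
    have hcast : ((k.toNat : Int)) = k := Int.toNat_of_nonneg hk
    have hle : s * s ≤ k := by
      have h1 : k.toNat.sqrt ^ 2 ≤ k.toNat := Nat.sqrt_le' k.toNat
      calc s * s = ((k.toNat.sqrt ^ 2 : Nat) : Int) := by rw [hsdef]; push_cast; ring
        _ ≤ ((k.toNat : Nat) : Int) := by exact_mod_cast h1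
        _ = k := hcast
    have hlt : k < (s + 1) * (s + 1) := by
      have h1 : k.toNat < (k.toNat.sqrt + 1) ^ 2 := Nat.lt_succ_sqrt' k.toNat
      calc k = ((k.toNat : Nat) : Int) := hcast.symm
        _ < (((k.toNat.sqrt + 1) ^ 2 : Nat) : Int) := by exact_mod_cast h1
        _ = (s + 1) * (s + 1) := by rw [hsdef]; push_cast; ring
    have hs0 : 0 ≤ s := by rw [hsdef]; positivity
    have hs1 : 1 ≤ s := by
      by_contra hc
      have hz : s = 0 := by omega
      rw [hz] at hlt
      norm_num at hlt
      omega
    have hsk : s ≤ k := by nlinarith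
    have hdiv : PySem.Int.floordiv k k = 1 := by
      rw [PySem.Int.floordiv_eq_iff_of_pos (by omega)]
      omega
    have hinit : k + 1 = k + PySem.Int.floordiv k k := by omega
    rw [pyIsqrt, if_neg (by omega), hinit]
    exact pv_go_eq k s hle hlt hs1 (k.toNat + 1) k hsk (by omega)

-- the flat index segment [k*k, (k+1)*(k+1)) is exactly shell k
theorem pv_seg_eq (n : Int) (k : Nat) :
    (PySem.List.pyRange ((k : Int) * (k : Int)) (((k : Int) + 1) * ((k : Int) + 1)) 1).map
        (fun i => pvState n (pyIsqrt i) (i - pyIsqrt i * pyIsqrt i - pyIsqrt i))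
      = (PySem.List.pyRange (-(k : Int)) ((k : Int) + 1) 1).map (pvState n (k : Int)) := by
  rw [PySem.List.pyRange_one, PySem.List.pyRange_one]
  have hlen1 : (((k : Int) + 1) * ((k : Int) + 1) - (k : Int) * (k : Int)).toNat = 2 * k + 1 := by
    have : ((k : Int) + 1) * ((k : Int) + 1) - (k : Int) * (k : Int) = 2 * (k : Int) + 1 := by ring
    rw [this]
    omega
  have hlen2 : (((k : Int) + 1) - (-(k : Int))).toNat = 2 * k + 1 := by omega
  rw [hlen1, hlen2, List.map_map, List.map_map]
  apply List.map_congr_left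
  intro t ht
  have ht' : t < 2 * k + 1 := List.mem_range.mp ht
  have hsq : pyIsqrt ((k : Int) * (k : Int) + (t : Int)) = (k : Int) := by
    have hnn : (0:Int) ≤ (k : Int) * (k : Int) + (t : Int) := by positivity
    rw [pv_isqrt_eq _ hnn]
    have htoNat : ((k : Int) * (k : Int) + (t : Int)).toNat = k * k + t := by
      have : (k : Int) * (k : Int) + (t : Int) = ((k * k + t : Nat) : Int) := by push_cast; ring
      rw [this, Int.toNat_natCast]
    rw [htoNat]
    have h1 : k ≤ Nat.sqrt (k * k + t) := Nat.le_sqrt'.mpr (by nlinarith)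
    have h2 : Nat.sqrt (k * k + t) < k + 1 := by
      rw [Nat.sqrt_lt']
      nlinarith
    omega
  simp only [Function.comp]
  rw [hsq]
  have harg : (k : Int) * (k : Int) + (t : Int) - (k : Int) * (k : Int) - (k : Int)
      = -(k : Int) + (t : Int) := by ring
  rw [harg]

theorem pv_map_prefix (n : Int) :
    ∀ k : Nat, (PySem.List.pyRange 0 ((k : Int) * (k : Int)) 1).map
        (fun i => pvState n (pyIsqrt i) (i - pyIsqrt i * pyIsqrt i - pyIsqrt i))
      = pvShells n k := by
  intro k
  induction k with
  | zero => simp [pvShells, PySem.List.pyRange_one_eq_nil]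
  | succ k ih =>
    have hsplit : PySem.List.pyRange 0 (((k+1 : Nat) : Int) * ((k+1 : Nat) : Int)) 1
        = PySem.List.pyRange 0 ((k : Int) * (k : Int)) 1
          ++ PySem.List.pyRange ((k : Int) * (k : Int)) (((k : Int) + 1) * ((k : Int) + 1)) 1 := by
      have h1 : ((k+1 : Nat) : Int) * ((k+1 : Nat) : Int) = ((k : Int) + 1) * ((k : Int) + 1) := by
        push_cast; ring
      rw [h1]
      exact PySem.List.pyRange_one_append 0 ((k : Int) * (k : Int))
        (((k : Int) + 1) * ((k : Int) + 1)) (by positivity) (by nlinarith)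
    rw [hsplit, List.map_append, ih, pv_seg_eq, pv_shells_succ]

theorem pv_B_eq_shells (n : Int) (hn : 1 ≤ n) :
    angular_states_alt n = pvShells n n.toNat := by
  unfold angular_states_alt
  rw [if_neg (by omega)]
  have hcast : ((n.toNat : Int)) = n := Int.toNat_of_nonneg (by omega)
  have hfun : (fun (states : List (List (String × Int))) (i : Int) =>
      let ell := pyIsqrt i
      states ++ [[("n", n), ("K", n - 1), ("ell", ell), ("m", i - ell * ell - ell)]])
      = (fun states i =>
          states ++ [pvState n (pyIsqrt i) (i - pyIsqrt i * pyIsqrt i - pyIsqrt i)]) := by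
    funext states i
    simp [pvState]
  rw [hfun, pv_foldl_app (fun i => pvState n (pyIsqrt i) (i - pyIsqrt i * pyIsqrt i - pyIsqrt i)),
    List.nil_append]
  have h := pv_map_prefix n n.toNat
  rw [hcast] at h
  exact h

-- ===== VERDICT (by name: the statement is the Claim_ definition above) =====
theorem angular_states_spec : Claim_equal_angular_states := by
  intro n _ hpre
  unfold Spec_angular_states
  rw [pv_A_eq_shells n hpre, pv_B_eq_shells n hpre]
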